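-- pv_equiv track=rewrite | github.com/shazhe/algorithm-exercise-1 | algorithms_mathy.py | overlap_tuples
-- ===== SOURCE A (Python) =====
-- def overlap_tuples(lst): # given lst of tuples, check if exist two with overlapping elements
--     counts = {} # adjacency for each point of each tuple in the lst -- can derive the maximum set of points lying in the same line
--     flag = False
--     for p1, p2 in lst:
--         if p1 in counts:
--             flag = True # we can return True here if only need to check existence
--             counts[p1].append(p2)
--         else:
--             counts[p1] = [p2]
--         if p2 in counts:
--             flag = True # we can return True here if only need to check existence
--             counts[p2].append(p1)
--         else:
--             counts[p2] = [p1]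
--     return flag, counts
-- ===== SOURCE B (Python) =====
-- def overlap_tuples(lst):
--     # Flatten to directed edges, take the distinct keys in first-occurrence
--     # order, then build the whole dict by one group-by comprehension: each
--     # key's partner list is collected by its own scan of the edge list.
--     # The flag is just "some key occurred more than once".
--     edges = [e for p, q in lst for e in ((p, q), (q, p))]
--     keys = list(dict.fromkeys(k for k, _ in edges))
--     counts = {k: [v for k2, v in edges if k2 == k] for k in keys}
--     return len(keys) < len(edges), counts
-- ===== Notes on version B (the rewrite author's own statement) =====
-- stated objective: alternative
-- what changed: B never builds the dict incrementally: it flattens the pairs to directed edges, computes the distinct keys with dict.fromkeys, builds the whole adjacency in one group-by dict comprehension (each key's list collected by its own scan of the edges), and reads the flag off as len(keys) < len(edges); it trades A's single dict-append pass for staged dedup + per-key scans (quadratic).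
import Mathlib
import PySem

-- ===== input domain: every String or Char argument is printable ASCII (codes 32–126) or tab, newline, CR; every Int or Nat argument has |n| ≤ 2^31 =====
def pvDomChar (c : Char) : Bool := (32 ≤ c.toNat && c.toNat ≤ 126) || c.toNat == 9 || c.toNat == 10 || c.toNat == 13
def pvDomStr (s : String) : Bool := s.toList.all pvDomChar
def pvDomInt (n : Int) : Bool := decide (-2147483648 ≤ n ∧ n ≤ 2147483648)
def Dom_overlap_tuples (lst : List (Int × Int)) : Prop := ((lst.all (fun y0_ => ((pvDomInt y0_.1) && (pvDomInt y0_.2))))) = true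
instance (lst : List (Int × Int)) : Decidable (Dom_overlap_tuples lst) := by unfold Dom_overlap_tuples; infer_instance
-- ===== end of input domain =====

-- B builds the adjacency by staged dedup + per-key group-by scans instead of A's
-- incremental dict-append pass, reading the flag off the key count (objective: alternative).


-- ===== PORT A =====
-- loop body of A: for (p1, p2), branch on membership for p1, then for p2, tracking the flag
def otStep (s : PySem.Dict Int (List Int) × Bool) (p : Int × Int) :
    PySem.Dict Int (List Int) × Bool :=
  let s1 := if s.1.contains p.1 then (s.1.modify p.1 [] (· ++ [p.2]), true)
            else (s.1.insert p.1 [p.2], s.2)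
  if s1.1.contains p.2 then (s1.1.modify p.2 [] (· ++ [p.1]), true)
  else (s1.1.insert p.2 [p.1], s1.2)

def overlap_tuples (lst : List (Int × Int)) : Bool × (List (Int × List Int)) :=
  let r := lst.foldl otStep (PySem.Dict.empty, false)
  (r.2, r.1.items)

-- ===== PORT B =====
-- edges = [e for p, q in lst for e in ((p, q), (q, p))]
def otEdges (lst : List (Int × Int)) : List (Int × Int) :=
  lst.flatMap (fun p => [(p.1, p.2), (p.2, p.1)])

-- [v for k2, v in edges if k2 == k]
def otPartners (edges : List (Int × Int)) (k : Int) : List Int :=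
  (edges.filter (fun e => e.1 == k)).map (·.2)

def overlap_tuples_alt (lst : List (Int × Int)) : Bool × (List (Int × List Int)) :=
  let edges := otEdges lst
  let keys := PySem.List.dedup (edges.map (·.1))        -- list(dict.fromkeys(…))
  let counts := keys.foldl (fun d k => d.insert k (otPartners edges k)) PySem.Dict.empty
  (decide (keys.length < edges.length), counts.items)

-- ===== PRECONDITION & SPEC =====
def Spec_overlap_tuples (lst : List (Int × Int)) (out : Bool × (List (Int × List Int))) : Prop := out = overlap_tuples_alt lst
instance (lst : List (Int × Int)) (out : Bool × (List (Int × List Int))) : Decidable (Spec_overlap_tuples lst out) := by unfold Spec_overlap_tuples; infer_instance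

-- ===== CLAIM (what is proved, stated in full; the proofs are below) =====
def Claim_equal_overlap_tuples : Prop := ∀ (lst : List (Int × Int)), Dom_overlap_tuples lst → Spec_overlap_tuples lst (overlap_tuples lst)

-- ===== LEMMAS AND PROOFS =====

-- A's per-pair body, split into its two identical halves: one membership-branching edge step
def edgeStepA (s : PySem.Dict Int (List Int) × Bool) (e : Int × Int) :
    PySem.Dict Int (List Int) × Bool :=
  if s.1.contains e.1 then (s.1.modify e.1 [] (· ++ [e.2]), true)
  else (s.1.insert e.1 [e.2], s.2)

theorem otStep_eq (s : PySem.Dict Int (List Int) × Bool) (p : Int × Int) :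
    otStep s p = edgeStepA (edgeStepA s (p.1, p.2)) (p.2, p.1) := rfl

theorem foldl_otStep_eq (lst : List (Int × Int)) (s : PySem.Dict Int (List Int) × Bool) :
    lst.foldl otStep s = (otEdges lst).foldl edgeStepA s := by
  induction lst generalizing s with
  | nil => rfl
  | cons p rest ih =>
      rw [List.foldl_cons, otStep_eq, ih]
      rfl

-- both branches of A's edge step update the dict like one 'modify … (· ++ [·])'
theorem edgeStepA_fst (s : PySem.Dict Int (List Int) × Bool) (e : Int × Int) :
    (edgeStepA s e).1 = s.1.modify e.1 [] (· ++ [e.2]) := by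
  by_cases h : s.1.contains e.1
  · simp [edgeStepA, h]
  · simp only [Bool.not_eq_true] at h
    simp only [edgeStepA, h, Bool.false_eq_true, if_false, PySem.Dict.modify]
    rw [PySem.Dict.getD_of_not_contains (h := h)]
    rfl

theorem size_modify (d : PySem.Dict Int (List Int)) (e : Int × Int) :
    (d.modify e.1 [] (· ++ [e.2])).size = if d.contains e.1 then d.size else d.size + 1 := by
  by_cases h : d.contains e.1
  · rw [if_pos h, PySem.Dict.modify, PySem.Dict.size_insert, if_pos h]
  · simp only [Bool.not_eq_true] at h
    rw [if_neg (by simp [h]), PySem.Dict.modify, PySem.Dict.size_insert, if_neg (by simp [h])]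

theorem size_foldl_modify_le (es : List (Int × Int)) (d : PySem.Dict Int (List Int)) :
    (es.foldl (fun d e => d.modify e.1 [] (· ++ [e.2])) d).size ≤ d.size + es.length := by
  induction es generalizing d with
  | nil => simp
  | cons e rest ih =>
      have := ih (d.modify e.1 [] (· ++ [e.2]))
      rw [size_modify] at this
      simp only [List.foldl, List.length_cons]
      split_ifs at this <;> omega

-- main invariant: the flag A maintains equals "fewer keys than edges processed so far"
theorem foldl_edgeStepA_inv (es : List (Int × Int)) (d : PySem.Dict Int (List Int)) (b : Bool) :
    es.foldl edgeStepA (d, b) =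
      (es.foldl (fun d e => d.modify e.1 [] (· ++ [e.2])) d,
       b || decide ((es.foldl (fun d e => d.modify e.1 [] (· ++ [e.2])) d).size < d.size + es.length)) := by
  induction es generalizing d b with
  | nil => simp
  | cons e rest ih =>
      have hstep : edgeStepA (d, b) e =
          (d.modify e.1 [] (· ++ [e.2]), if d.contains e.1 then true else b) := by
        have := edgeStepA_fst (d, b) e
        by_cases h : d.contains e.1 <;> simp_all [edgeStepA]
      simp only [List.foldl, hstep]
      rw [ih]
      by_cases h : d.contains e.1
      · have hle := size_foldl_modify_le rest (d.modify e.1 [] (· ++ [e.2]))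
        rw [size_modify, if_pos h] at hle
        have h1 : (rest.foldl (fun d e => d.modify e.1 [] (· ++ [e.2]))
            (d.modify e.1 [] (· ++ [e.2]))).size < d.size + (rest.length + 1) := by omega
        simp [size_modify, h, h1]
      · have h2 : (d.modify e.1 [] (· ++ [e.2])).size + rest.length = d.size + (rest.length + 1) := by
          rw [size_modify, if_neg (by simpa using h)]; omega
        simp [h, h2]
        rfl

-- the dict A's loop builds: keys, lookups, items
theorem keys_A (es : List (Int × Int)) :
    (es.foldl (fun d e => d.modify e.1 [] (· ++ [e.2])) PySem.Dict.empty).keys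
      = PySem.List.dedup (es.map (·.1)) := by
  rw [PySem.Dict.keys_foldl_modify_key]
  simp [PySem.Set.update_nil_left]

theorem nodup_keys_A (es : List (Int × Int)) :
    (es.foldl (fun d e => d.modify e.1 [] (· ++ [e.2])) PySem.Dict.empty).keys.Nodup := by
  exact PySem.Dict.nodup_keys_foldl_modify_key es (·.1) [] (fun d e => (· ++ [e.2])) _
    PySem.Dict.nodup_keys_empty

theorem getD_A (es : List (Int × Int)) (k : Int) :
    (es.foldl (fun d e => d.modify e.1 [] (· ++ [e.2])) PySem.Dict.empty).getD k []
      = otPartners es k := by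
  rw [PySem.Dict.getD_foldl_modify_append]
  simp [otPartners]

theorem items_A (es : List (Int × Int)) :
    (es.foldl (fun d e => d.modify e.1 [] (· ++ [e.2])) PySem.Dict.empty).items
      = (PySem.List.dedup (es.map (·.1))).map (fun k => (k, otPartners es k)) := by
  rw [PySem.Dict.items_eq_map_keys _ (nodup_keys_A es) [], keys_A]
  exact List.map_congr_left (fun k _ => by rw [getD_A])

-- the dict B's loop builds has the same items
theorem items_B (es : List (Int × Int)) :
    ((PySem.List.dedup (es.map (·.1))).foldl
        (fun d k => d.insert k (otPartners es k)) PySem.Dict.empty).items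
      = (PySem.List.dedup (es.map (·.1))).map (fun k => (k, otPartners es k)) := by
  rw [PySem.Dict.items_foldl_insert_fresh _ _ _ _
        (fun k _ => PySem.Dict.contains_empty k)
        (by simp)]
  rfl

-- ===== VERDICT (by name: the statement is the Claim_ definition above) =====
theorem overlap_tuples_spec : Claim_equal_overlap_tuples := by
  intro lst _
  show overlap_tuples lst = overlap_tuples_alt lst
  unfold overlap_tuples overlap_tuples_alt
  rw [foldl_otStep_eq, foldl_edgeStepA_inv]
  set es := otEdges lst with hes
  have hsize : (es.foldl (fun d e => d.modify e.1 [] (· ++ [e.2])) PySem.Dict.empty).size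
      = (PySem.List.dedup (es.map (·.1))).length := by
    show (es.foldl (fun d e => d.modify e.1 [] (· ++ [e.2])) PySem.Dict.empty).items.length = _
    rw [items_A, List.length_map]
  simp only [items_A, items_B, PySem.Dict.size_empty, Nat.zero_add, hsize, Bool.false_or]
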